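-- pv_equiv track=rewrite | github.com/andruwko73/bypass_keenetic | web_bot.py | _normalize_unblock_list
-- ===== SOURCE A (Python) =====
-- def _normalize_unblock_list(text):
--     items = []
--     seen = set()
--     for raw_line in text.replace('\r', '\n').split('\n'):
--         line = raw_line.strip()
--         if not line or line in seen:
--             continue
--         seen.add(line)
--         items.append(line)
--     items.sort()
--     return '\n'.join(items)
-- ===== SOURCE B (Python) =====
-- def _normalize_unblock_list(text):
--     lines = sorted(
--         line
--         for line in (raw.strip() for raw in text.replace('\r', '\n').split('\n'))
--         if line
--     )
--     out = []
--     for line in lines: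
--         if not out or out[-1] != line:
--             out.append(line)
--     return '\n'.join(out)
-- ===== Notes on version B (the rewrite author's own statement) =====
-- stated objective: idiomatic
-- what changed: B drops the membership set entirely: it collects all non-empty stripped lines (duplicates included), sorts them, and deduplicates by adjacency against the last emitted element (uniq-after-sort).
import Mathlib
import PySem

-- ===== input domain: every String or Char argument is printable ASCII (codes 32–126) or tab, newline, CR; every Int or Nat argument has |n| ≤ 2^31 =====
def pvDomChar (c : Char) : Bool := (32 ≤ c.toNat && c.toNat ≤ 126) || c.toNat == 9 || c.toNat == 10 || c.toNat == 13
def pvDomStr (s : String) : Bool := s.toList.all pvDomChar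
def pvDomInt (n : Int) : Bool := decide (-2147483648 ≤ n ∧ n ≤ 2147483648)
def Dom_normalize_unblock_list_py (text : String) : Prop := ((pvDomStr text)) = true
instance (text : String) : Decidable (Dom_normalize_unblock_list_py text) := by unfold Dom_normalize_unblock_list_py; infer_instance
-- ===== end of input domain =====

-- B replaces A's membership set with uniq-after-sort: sort all non-empty stripped lines, then dedup by adjacency (idiomatic; same cost).

-- ===== PORT A =====
def normalize_unblock_list_py (text : String) : String :=
  let st := (((PySem.Str.split? (PySem.Str.replace text "\r" "\n") "\n").getD []).foldl
    (fun (acc : List String × PySem.Set String) raw_line =>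
      let line := PySem.Str.strip raw_line
      if line = "" ∨ PySem.Set.contains acc.2 line = true then acc
      else (acc.1 ++ [line], PySem.Set.add acc.2 line))
    ([], PySem.Set.empty))
  PySem.Str.join "\n" (PySem.List.sorted st.1 (fun x => x) false)

-- ===== PORT B =====
def normalize_unblock_list_py_alt (text : String) : String :=
  let lines := PySem.List.sorted
    ((((PySem.Str.split? (PySem.Str.replace text "\r" "\n") "\n").getD []).map PySem.Str.strip).filter
      (fun line => line != "")) (fun x => x) false
  let out := lines.foldl
    (fun (out : List String) line =>
      if out = [] ∨ out.getLast? ≠ some line then out ++ [line] else out) []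
  PySem.Str.join "\n" out

-- ===== PRECONDITION & SPEC =====
def Spec_normalize_unblock_list_py (text : String) (out : String) : Prop := out = normalize_unblock_list_py_alt text
instance (text : String) (out : String) : Decidable (Spec_normalize_unblock_list_py text out) := by unfold Spec_normalize_unblock_list_py; infer_instance

-- ===== CLAIM (what is proved, stated in full; the proofs are below) =====
def Claim_equal_normalize_unblock_list_py : Prop := ∀ (text : String), Dom_normalize_unblock_list_py text → Spec_normalize_unblock_list_py text (normalize_unblock_list_py text)

-- ===== LEMMAS AND PROOFS =====

-- A's loop keeps items and seen equal as lists, and is Set.add over the stripped non-empty lines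
theorem foldA_eq (raws : List String) (s : List String) :
    raws.foldl
      (fun (acc : List String × PySem.Set String) raw_line =>
        let line := PySem.Str.strip raw_line
        if line = "" ∨ PySem.Set.contains acc.2 line = true then acc
        else (acc.1 ++ [line], PySem.Set.add acc.2 line)) (s, s)
    = (let r := ((raws.map PySem.Str.strip).filter (fun line => line != "")).foldl PySem.Set.add s
       (r, r)) := by
  set f := (fun (acc : List String × PySem.Set String) raw_line =>
        let line := PySem.Str.strip raw_line
        if line = "" ∨ PySem.Set.contains acc.2 line = true then acc
        else (acc.1 ++ [line], PySem.Set.add acc.2 line)) with hf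
  induction raws generalizing s with
  | nil => simp
  | cons raw t ih =>
    rw [List.foldl_cons, List.map_cons, List.filter_cons]
    by_cases h0 : PySem.Str.strip raw = ""
    · have hstep : f (s, s) raw = (s, s) := by rw [hf]; simp [h0]
      rw [hstep, ih s]
      simp [h0]
    · by_cases hc : PySem.Str.strip raw ∈ s
      · have hstep : f (s, s) raw = (s, s) := by
          rw [hf]; simp [h0, hc]
      -- the skipped line is already in s, so Set.add keeps s as well
        have hadd : PySem.Set.add s (PySem.Str.strip raw) = s := by
          simp [PySem.Set.add, hc]
        rw [hstep, ih s]
        simp [h0, List.foldl_cons, hadd]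
      · have hadd : PySem.Set.add s (PySem.Str.strip raw) = s ++ [PySem.Str.strip raw] := by
          simp [PySem.Set.add, hc]
        have hstep : f (s, s) raw
            = (s ++ [PySem.Str.strip raw], s ++ [PySem.Str.strip raw]) := by
          rw [hf]; simp [h0, hc, hadd]
        rw [hstep, ih (s ++ [PySem.Str.strip raw])]
        simp [h0, List.foldl_cons, hadd]

-- in a strictly increasing list every element is ≤ the last one
theorem le_getLast_of_pairwise_lt (l : List String) (m : String)
    (hp : l.Pairwise (· < ·)) (hm : l.getLast? = some m) :
    ∀ a ∈ l, a ≤ m := by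
  induction l with
  | nil => simp at hm
  | cons b t ih =>
    cases t with
    | nil =>
      simp at hm; subst hm
      intro a ha; simp at ha; subst ha; exact le_refl _
    | cons c u =>
      have hm' : (c :: u).getLast? = some m := by
        simpa [List.getLast?_cons_cons] using hm
      have hp' := (List.pairwise_cons.mp hp)
      intro a ha
      rcases List.mem_cons.mp ha with rfl | ha'
      · have hmmem : m ∈ c :: u := List.mem_of_getLast? hm'
        exact le_of_lt (hp'.1 m hmmem)
      · exact ih hp'.2 hm' a ha'

-- the adjacency-dedup fold: invariant on the accumulator
theorem foldB_inv (l : List String) (acc : List String)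
    (hacc : acc.Pairwise (· < ·))
    (hl : l.Pairwise (· ≤ ·))
    (hle : ∀ a ∈ acc, ∀ x ∈ l, a ≤ x) :
    (l.foldl
      (fun (out : List String) line =>
        if out = [] ∨ out.getLast? ≠ some line then out ++ [line] else out) acc).Pairwise (· < ·)
    ∧ ∀ y, (y ∈ l.foldl
      (fun (out : List String) line =>
        if out = [] ∨ out.getLast? ≠ some line then out ++ [line] else out) acc
        ↔ y ∈ acc ∨ y ∈ l) := by
  induction l generalizing acc with
  | nil => simpa using hacc
  | cons x t ih =>
    have hx : ∀ y ∈ t, x ≤ y := (List.pairwise_cons.mp hl).1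
    have ht : t.Pairwise (· ≤ ·) := (List.pairwise_cons.mp hl).2
    by_cases hcond : acc = [] ∨ acc.getLast? ≠ some x
    · -- append branch
      have hacc' : (acc ++ [x]).Pairwise (· < ·) := by
        apply List.pairwise_append.mpr
        refine ⟨hacc, by simp, ?_⟩
        intro a ha b hb
        simp at hb; rw [hb]
        have hne : acc ≠ [] := by intro h; subst h; simp at ha
        obtain ⟨m, hm⟩ : ∃ m, acc.getLast? = some m :=
          Option.isSome_iff_exists.mp (by simpa [List.getLast?_isSome] using hne)
        have ham : a ≤ m := le_getLast_of_pairwise_lt acc m hacc hm a ha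
        have hmmem : m ∈ acc := List.mem_of_getLast? hm
        have hmx : m ≤ x := hle m hmmem x (by simp)
        have hmne : m ≠ x := by
          rcases hcond with h | h
          · exact absurd h hne
          · intro heq; exact h (heq ▸ hm)
        exact lt_of_le_of_lt ham (lt_of_le_of_ne hmx hmne)
      have hle' : ∀ a ∈ acc ++ [x], ∀ y ∈ t, a ≤ y := by
        intro a ha y hy
        rcases List.mem_append.mp ha with h | h
        · exact hle a h y (by simp [List.mem_cons, hy])
        · simp at h; subst h; exact hx y hy
      have := ih (acc ++ [x]) hacc' ht hle'
      simp only [List.foldl_cons, if_pos hcond]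
      refine ⟨this.1, ?_⟩
      intro y
      rw [(this.2 y)]
      simp [List.mem_append, List.mem_cons]
      tauto
    · -- skip branch: x is the last of acc, hence x ∈ acc
      push_neg at hcond
      have hxmem : x ∈ acc := List.mem_of_getLast? hcond.2
      have hle' : ∀ a ∈ acc, ∀ y ∈ t, a ≤ y := by
        intro a ha y hy; exact hle a ha y (by simp [List.mem_cons, hy])
      have := ih acc hacc ht hle'
      have hcond' : ¬ (acc = [] ∨ acc.getLast? ≠ some x) := by
        push_neg; exact hcond
      simp only [List.foldl_cons, if_neg hcond']
      refine ⟨this.1, ?_⟩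
      intro y
      rw [(this.2 y)]
      constructor
      · rintro (h | h)
        · exact Or.inl h
        · exact Or.inr (List.mem_cons_of_mem _ h)
      · rintro (h | h)
        · exact Or.inl h
        · rcases List.mem_cons.mp h with rfl | h'
          · exact Or.inl hxmem
          · exact Or.inr h'

-- ===== VERDICT (by name: the statement is the Claim_ definition above) =====
theorem normalize_unblock_list_py_spec : Claim_equal_normalize_unblock_list_py := by
  intro text _
  unfold Spec_normalize_unblock_list_py normalize_unblock_list_py normalize_unblock_list_py_alt
  set raws := (PySem.Str.split? (PySem.Str.replace text "\r" "\n") "\n").getD [] with hraws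
  set ls := (raws.map PySem.Str.strip).filter (fun line => line != "") with hls
  have hA := foldA_eq raws []
  simp only [PySem.Set.empty] at *
  rw [hA]
  simp only [← hls]
  rw [(PySem.Set.ofList_eq_foldl ls).symm]
  -- B side: uniq of sorted
  set sl := PySem.List.sorted ls (fun x => x) false with hsl
  have hsp : sl.Pairwise (· ≤ ·) := by
    simpa using PySem.List.sorted_pairwise ls (fun x => x)
  have hinv := foldB_inv sl [] (by simp) hsp (by simp)
  set uniq := sl.foldl
      (fun (out : List String) line =>
        if out = [] ∨ out.getLast? ≠ some line then out ++ [line] else out) [] with huniq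
  have huq_lt : uniq.Pairwise (· < ·) := hinv.1
  have huq_mem : ∀ y, y ∈ uniq ↔ y ∈ ls := by
    intro y
    rw [hinv.2 y]
    simp [hsl, PySem.List.mem_sorted]
  have huq_nodup : uniq.Nodup := huq_lt.imp (fun h => ne_of_lt h)
  have hperm : uniq.Perm (PySem.Set.ofList ls) := by
    rw [List.perm_ext_iff_of_nodup huq_nodup (PySem.Set.nodup_ofList ls)]
    intro y
    rw [huq_mem y, PySem.Set.mem_ofList]
  have hsorted : PySem.List.sorted (PySem.Set.ofList ls) (fun x => x) false = uniq := by
    apply PySem.List.sorted_eq_of_perm_of_pairwise_lt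
    · exact hperm
    · simpa using huq_lt
  rw [hsorted]
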